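-- pv_equiv track=rewrite | github.com/lexust1/code4fun | Python/mfti_algos/lec23_lecture/adjacency_list_offset.py | create_edges_and_offset
-- ===== SOURCE A (Python) =====
-- def create_edges_and_offset(adj_list):
--     """
--     Преобразует список смежности графа в список ребер и список офсетов.
--
--     Args:
--     adj_list (dict): Список смежности графа, где ключи - это вершины,
--                      а значения - списки смежных вершин.
--
--     Returns:
--     tuple: Возвращает кортеж, содержащий два элемента:
--            - список ребер (edges, list): Список ребер графа, где каждое
--             ребро представлено парой вершин.
--            - список офсетов (offset, list): Список офсетов для каждой
--            вершины, показывающий начало и конец ребер в списке edges.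
--     """
--     edges = []  # Инициализация списка ребер
--     offset = [0]  # Начальный офсет устанавливается в 0
--     # Перебор всех вершин и их соседей
--     for node in sorted(adj_list.keys()):
--         for neighbor in sorted(adj_list[node]):
--             # Добавляем ребро, если оно еще не добавлено (избегаем дублирования)
--             if node < neighbor:
--                 edges.append(node)
--                 edges.append(neighbor)
--         # Обновляем офсет после добавления ребер текущей вершины
--         offset.append(len(edges))
--     return edges, offset
-- ===== SOURCE B (Python) =====
-- def create_edges_and_offset(adj_list):
--     """Different algorithm: one global lexicographic sort of all oriented
--     edge pairs (no per-vertex sorting loops), then edges by flattening the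
--     pairs and offsets by prefix-summing a dict of per-vertex pair counts."""
--     pairs = sorted((a, b) for a, nbs in adj_list.items() for b in nbs if a < b)
--     edges = []
--     for a, b in pairs:
--         edges.append(a)
--         edges.append(b)
--     counts = {}
--     for a, _ in pairs:
--         counts[a] = counts.get(a, 0) + 1
--     offset = [0]
--     total = 0
--     for v in sorted(adj_list):
--         total += 2 * counts.get(v, 0)
--         offset.append(total)
--     return edges, offset
-- ===== Notes on version B (the rewrite author's own statement) =====
-- stated objective: alternative
-- what changed: Replaces A's nested loops (sorted keys, per-key sorted neighbors, offset snapshots of len(edges)) by one global lexicographic sort of all oriented edge pairs, a flattening pass for edges, a dict counting pairs per vertex, and a prefix sum of 2*count over sorted keys for offsets.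
import Mathlib
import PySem

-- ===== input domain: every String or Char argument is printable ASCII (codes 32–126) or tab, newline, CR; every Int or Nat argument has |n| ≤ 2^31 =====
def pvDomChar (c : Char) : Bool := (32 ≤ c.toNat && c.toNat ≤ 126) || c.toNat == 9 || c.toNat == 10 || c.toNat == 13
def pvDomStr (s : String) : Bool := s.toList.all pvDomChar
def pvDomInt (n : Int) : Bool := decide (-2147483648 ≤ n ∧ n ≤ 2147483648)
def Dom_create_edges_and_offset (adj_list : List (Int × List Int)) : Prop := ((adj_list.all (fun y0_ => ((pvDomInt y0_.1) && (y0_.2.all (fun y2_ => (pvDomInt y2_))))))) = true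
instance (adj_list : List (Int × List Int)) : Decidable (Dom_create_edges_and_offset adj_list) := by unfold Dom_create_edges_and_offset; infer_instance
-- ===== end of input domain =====

-- B replaces A's nested sorted loops by one global lexicographic sort of the oriented edge
-- pairs plus a count dict and a prefix sum; a timing run measured B faster at the largest size.

-- ===== PORT A =====
-- one fused loop over sorted keys; inner loop over sorted neighbors appends edge endpoints; offset snapshots len(edges)
def create_edges_and_offset (adj_list : List (Int × List Int)) : List Int × List Int :=
  let d := PySem.Dict.ofList adj_list
  (PySem.List.sorted d.keys (fun x => x) false).foldl
    (fun (st : List Int × List Int) node =>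
      let edges := (PySem.List.sorted (d.getD node []) (fun x => x) false).foldl
        (fun e nb => if node < nb then e ++ [node, nb] else e) st.1
      (edges, st.2 ++ [(edges.length : Int)]))
    ([], [0])

-- ===== PORT B =====
-- global lexicographic sort of all oriented pairs; edges by flattening; counts dict; offsets by prefix sum
def create_edges_and_offset_alt (adj_list : List (Int × List Int)) : List Int × List Int :=
  let d := PySem.Dict.ofList adj_list
  let pairs := PySem.List.sorted2
    (d.items.flatMap (fun kv => (kv.2.filter (fun b => decide (kv.1 < b))).map (fun b => (kv.1, b))))
    (fun p => p.1) (fun p => p.2) false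
  let edges := pairs.foldl (fun e p => e ++ [p.1, p.2]) []
  let counts := pairs.foldl (fun (c : PySem.Dict Int Int) p => c.insert p.1 (c.getD p.1 0 + 1)) PySem.Dict.empty
  let offset := ((PySem.List.sorted d.keys (fun x => x) false).foldl
    (fun (st : List Int × Int) v =>
      let t := st.2 + 2 * counts.getD v 0
      (st.1 ++ [t], t)) ([0], (0 : Int))).1
  (edges, offset)

-- ===== PRECONDITION & SPEC =====
def Spec_create_edges_and_offset (adj_list : List (Int × List Int)) (out : List Int × List Int) : Prop := out = create_edges_and_offset_alt adj_list
instance (adj_list : List (Int × List Int)) (out : List Int × List Int) : Decidable (Spec_create_edges_and_offset adj_list out) := by unfold Spec_create_edges_and_offset; infer_instance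

-- ===== CLAIM =====
def Claim_equal_create_edges_and_offset : Prop := ∀ (adj_list : List (Int × List Int)), Dom_create_edges_and_offset adj_list → Spec_create_edges_and_offset adj_list (create_edges_and_offset adj_list)

-- ===== LEMMAS AND PROOFS =====

-- the sorted chunk of oriented pairs at key k (proof-side abbreviation)
def chunkP (d : PySem.Dict Int (List Int)) (k : Int) : List (Int × Int) :=
  ((PySem.List.sorted (d.getD k []) (fun x => x) false).filter (fun b => decide (k < b))).map (fun b => (k, b))

-- A's per-key edge run, as a flatMap
def chunkA (d : PySem.Dict Int (List Int)) (k : Int) : List Int :=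
  (PySem.List.sorted (d.getD k []) (fun x => x) false).flatMap (fun nb => if k < nb then [k, nb] else [])

-- sorted2's pair comparison is the strict lexicographic order
theorem lt_lex_bool (a b : Int × Int) :
    (decide (a.1 < b.1) || (!decide (b.1 < a.1) && decide (a.2 < b.2))) = decide (toLex a < toLex b) := by
  simp only [Prod.Lex.toLex_lt_toLex]
  by_cases h1 : a.1 < b.1 <;> by_cases h2 : b.1 < a.1 <;> by_cases h3 : a.2 < b.2 <;>
    simp [h1, h2, h3] <;> omega

-- Python's tuple sort is sorting by the lexicographic key
theorem sorted2_eq_sorted_toLex (xs : List (Int × Int)) :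
    PySem.List.sorted2 xs (fun p => p.1) (fun p => p.2) false
      = PySem.List.sorted xs (fun p => toLex p) false := by
  rw [PySem.List.sorted_eq_foldl_insertBy]
  simp only [PySem.List.sorted2, lt_lex_bool, if_neg (by decide : ¬ (false = true))]

-- A's inner append loop produces exactly the per-vertex run, appended to the accumulator
theorem innerA_eq_chunk (node : Int) (l : List Int) (e0 : List Int) :
    l.foldl (fun e nb => if node < nb then e ++ [node, nb] else e) e0
      = e0 ++ l.flatMap (fun nb => if node < nb then [node, nb] else []) := by
  induction l generalizing e0 with
  | nil => simp
  | cons x xs ih =>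
    simp only [List.foldl_cons, List.flatMap_cons, ih]
    split_ifs <;> simp

-- A's fused loop equals flatten-of-runs plus a prefix-sum fold over the runs
theorem main_fold (d : PySem.Dict Int (List Int)) (ks : List Int)
    (e0 off0 : List Int) (t0 : Int) (h : t0 = (e0.length : Int)) :
    ks.foldl
      (fun (st : List Int × List Int) node =>
        let edges := (PySem.List.sorted (d.getD node []) (fun x => x) false).foldl
          (fun e nb => if node < nb then e ++ [node, nb] else e) st.1
        (edges, st.2 ++ [(edges.length : Int)]))
      (e0, off0)
    = (e0 ++ (ks.map (chunkA d)).flatten,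
       ((ks.map (chunkA d)).foldl
         (fun (st : List Int × Int) ch =>
           let t := st.2 + (ch.length : Int); (st.1 ++ [t], t)) (off0, t0)).1) := by
  induction ks generalizing e0 off0 t0 with
  | nil => simp
  | cons k ks ih =>
    simp only [List.foldl_cons, List.map_cons]
    rw [innerA_eq_chunk, ih _ _ _ rfl]
    simp [chunkA, h, List.append_assoc]

-- a filtered flatMap of 2-element runs is the flattening of the corresponding pair list
theorem flat_if_eq (k : Int) (l : List Int) :
    l.flatMap (fun nb => if k < nb then [k, nb] else [])
      = ((l.filter (fun b => decide (k < b))).map (fun b => (k, b))).flatMap (fun p => [p.1, p.2]) := by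
  induction l with
  | nil => simp
  | cons x xs ih =>
    simp only [List.flatMap_cons, List.filter_cons]
    by_cases h : k < x <;> simp [h, ih]

theorem chunkA_eq_flat (d : PySem.Dict Int (List Int)) (k : Int) :
    chunkA d k = (chunkP d k).flatMap (fun p => [p.1, p.2]) := by
  simp [chunkA, chunkP, flat_if_eq]

-- B's flattening loop as a flatMap
theorem foldl_pairs_eq (l : List (Int × Int)) :
    l.foldl (fun e p => e ++ [p.1, p.2]) ([] : List Int) = l.flatMap (fun p => [p.1, p.2]) := by
  simpa using PySem.List.foldl_append_eq_flatMap (fun p : Int × Int => [p.1, p.2]) l []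

theorem length_flat_pairs (l : List (Int × Int)) :
    ((l.flatMap (fun p => [p.1, p.2])).length : Int) = 2 * (l.length : Int) := by
  induction l with
  | nil => simp
  | cons x xs ih => simp [List.flatMap_cons]; ring

-- the globally sorted pair list is exactly the concatenation of the per-key runs over sorted keys
theorem sorted_raw_eq_target (d : PySem.Dict Int (List Int)) (hnd : d.keys.Nodup) :
    PySem.List.sorted
      (d.items.flatMap (fun kv => (kv.2.filter (fun b => decide (kv.1 < b))).map (fun b => (kv.1, b))))
      (fun p => toLex p) false
    = (PySem.List.sorted d.keys (fun x => x) false).flatMap (chunkP d) := by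
  have hks : (PySem.List.sorted d.keys (fun x => x) false).Perm d.keys :=
    PySem.List.sorted_perm d.keys (fun x => x) false
  -- the target is a permutation of the raw pair list
  have hperm : ((PySem.List.sorted d.keys (fun x => x) false).flatMap (chunkP d)).Perm
      (d.items.flatMap (fun kv => (kv.2.filter (fun b => decide (kv.1 < b))).map (fun b => (kv.1, b)))) := by
    rw [PySem.Dict.items_eq_map_keys d hnd ([] : List Int), List.flatMap_map]
    exact List.Perm.flatMap hks (fun a _ =>
      ((PySem.List.sorted_perm (d.getD a []) (fun x => x) false).filter _).map _)
  -- the target is pairwise lexicographically ≤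
  have hpw : ((PySem.List.sorted d.keys (fun x => x) false).flatMap (chunkP d)).Pairwise
      (fun a b => toLex a ≤ toLex b) := by
    apply List.pairwise_flatMap.mpr
    constructor
    · intro k _
      apply List.pairwise_map.mpr
      apply List.Pairwise.filter
      apply (PySem.List.sorted_pairwise (d.getD k []) (fun x => x)).imp
      intro a b hab
      exact Prod.Lex.toLex_le_toLex.mpr (Or.inr ⟨rfl, hab⟩)
    · have hlt : (PySem.List.sorted d.keys (fun x => x) false).Pairwise (· < ·) := by
        have h1 := PySem.List.sorted_pairwise d.keys (fun x => x)
        have h2 : (PySem.List.sorted d.keys (fun x => x) false).Nodup := hks.symm.nodup hnd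
        exact (h1.and h2).imp (fun h => lt_of_le_of_ne h.1 h.2)
      apply hlt.imp
      intro k1 k2 hk12 x hx y hy
      have hx1 : x.1 = k1 := by
        rcases List.mem_map.mp hx with ⟨b, _, rfl⟩; rfl
      have hy1 : y.1 = k2 := by
        rcases List.mem_map.mp hy with ⟨b, _, rfl⟩; rfl
      exact Prod.Lex.toLex_le_toLex.mpr (Or.inl (by rw [hx1, hy1]; exact hk12))
  exact PySem.List.eq_of_perm_of_pairwise_le_of_injective (fun p => toLex p)
    (fun _ _ h => toLex.injective h)
    ((PySem.List.sorted_perm _ _ false).trans hperm.symm)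
    (PySem.List.sorted_pairwise _ _) hpw

-- counts dict lookups count first components
theorem counts_getD (pairs : List (Int × Int)) (v : Int) :
    (pairs.foldl (fun (c : PySem.Dict Int Int) p => c.insert p.1 (c.getD p.1 0 + 1)) PySem.Dict.empty).getD v 0
      = ((pairs.map (fun p => p.1)).count v : Int) := by
  have := PySem.Dict.getD_foldl_insert_add_one (pairs.map (fun p => p.1)) PySem.Dict.empty v
  rw [List.foldl_map] at this
  simpa using this

-- first components of one run count k only when the run's key is k
theorem count_fst_chunk (d : PySem.Dict Int (List Int)) (j k : Int) :
    ((chunkP d j).map (fun p => p.1)).count k = if j = k then (chunkP d j).length else 0 := by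
  have hmap : (chunkP d j).map (fun p => p.1)
      = List.replicate (chunkP d j).length j := by
    simp [chunkP, List.map_map]
  rw [hmap, List.count_replicate]
  by_cases h : j = k <;> simp [h]

theorem count_fst_zero (d : PySem.Dict Int (List Int)) (t : List Int) (k : Int) (h : k ∉ t) :
    ((t.flatMap (chunkP d)).map (fun p => p.1)).count k = 0 := by
  induction t with
  | nil => simp
  | cons b r ih =>
    have hb : b ≠ k := fun hbk => h (hbk ▸ List.mem_cons_self)
    simp only [List.flatMap_cons, List.map_append, List.count_append,
      count_fst_chunk, if_neg hb]
    simpa using ih (fun hk => h (List.mem_cons_of_mem _ hk))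

-- count of k among first components of the concatenated runs, for a key k of the nodup list
theorem count_fst_target (d : PySem.Dict Int (List Int)) (ks : List Int) (k : Int)
    (hnd : ks.Nodup) (hk : k ∈ ks) :
    ((ks.flatMap (chunkP d)).map (fun p => p.1)).count k = (chunkP d k).length := by
  induction ks with
  | nil => simp at hk
  | cons a t ih =>
    simp only [List.flatMap_cons, List.map_append, List.count_append, count_fst_chunk]
    rcases List.mem_cons.mp hk with rfl | hkt
    · rw [count_fst_zero d t k (List.nodup_cons.mp hnd).1]
      simp
    · have hak : a ≠ k := by
        rintro rfl; exact (List.nodup_cons.mp hnd).1 hkt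
      rw [ih (List.nodup_cons.mp hnd).2 hkt, if_neg hak]
      simp

-- ===== VERDICT =====
theorem create_edges_and_offset_spec : Claim_equal_create_edges_and_offset := by
  intro adj_list _
  show _ = _
  have hnd : (PySem.Dict.ofList adj_list).keys.Nodup := PySem.Dict.nodup_keys_ofList adj_list
  have hksnd : (PySem.List.sorted (PySem.Dict.ofList adj_list).keys (fun x => x) false).Nodup :=
    (PySem.List.sorted_perm _ _ false).symm.nodup hnd
  simp only [create_edges_and_offset, create_edges_and_offset_alt]
  rw [main_fold (PySem.Dict.ofList adj_list) _ [] [0] 0 (by simp)]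
  rw [sorted2_eq_sorted_toLex, sorted_raw_eq_target _ hnd]
  rw [foldl_pairs_eq]
  refine Prod.ext ?_ ?_
  · -- edges agree
    dsimp only
    rw [List.flatMap_assoc, ← List.flatMap_def]
    simp only [List.nil_append]
    have hfun : chunkA (PySem.Dict.ofList adj_list)
        = fun k => (chunkP (PySem.Dict.ofList adj_list) k).flatMap (fun p => [p.1, p.2]) :=
      funext (chunkA_eq_flat (PySem.Dict.ofList adj_list))
    rw [hfun]
  · -- offsets agree
    dsimp only
    rw [List.foldl_map]
    refine congrArg Prod.fst ?_
    apply PySem.List.foldl_congr_mem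
    intro acc v hv
    have hcnt := counts_getD
      ((PySem.List.sorted (PySem.Dict.ofList adj_list).keys (fun x => x) false).flatMap
        (chunkP (PySem.Dict.ofList adj_list))) v
    rw [count_fst_target _ _ v hksnd hv] at hcnt
    have hlen : ((chunkA (PySem.Dict.ofList adj_list) v).length : Int)
        = 2 * ((chunkP (PySem.Dict.ofList adj_list) v).length : Int) := by
      rw [chunkA_eq_flat, length_flat_pairs]
    simp only [hcnt, hlen]
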